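-- pv_equiv track=rewrite | github.com/christianebacani/Roadmap | Coding Challenges using Python and SQL/Code Wars Python Solved Problems/7 Kyu/counting_in_tha_amazon.py | count_arara
-- ===== SOURCE A (Python) =====
-- def count_arara(number: int) -> str:
--     number_and_arara = {
--         1: 'anane',
--         2: 'adak',
--         3: 'adak anane',
--         4:  'adak adak',
--         5: 'adak adak anane',
--         6: 'adak adak adak',
--         7: 'adak adak adak anane',
--         8: 'adak adak adak adak'
--     }
--
--     if number <= 8:
--         return number_and_arara[number]
--
--     result = []
--
--     while number != 0:
--         if number > 8:
--             result.append(number_and_arara[8])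
--             number -= 8
--
--         else:
--             result.append(number_and_arara[number])
--             number = 0
--
--     return ' '.join(result)
-- ===== SOURCE B (Python) =====
-- def count_arara(number: int) -> str:
--     # closed form: adak = 2, anane = 1
--     parts = ['adak'] * (number // 2)
--     if number % 2:
--         parts.append('anane')
--     return ' '.join(parts)
-- ===== Notes on version B (the rewrite author's own statement) =====
-- stated objective: simpler
-- what changed: Replaced the 1..8 lookup table and the repeated subtract-8 while loop by one closed form: 'adak' repeated number//2 times plus a trailing 'anane' if number is odd, joined with spaces.
-- outside the precondition, e.g. on count_arara(0): A raises KeyError, B returns ''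
import Mathlib
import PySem

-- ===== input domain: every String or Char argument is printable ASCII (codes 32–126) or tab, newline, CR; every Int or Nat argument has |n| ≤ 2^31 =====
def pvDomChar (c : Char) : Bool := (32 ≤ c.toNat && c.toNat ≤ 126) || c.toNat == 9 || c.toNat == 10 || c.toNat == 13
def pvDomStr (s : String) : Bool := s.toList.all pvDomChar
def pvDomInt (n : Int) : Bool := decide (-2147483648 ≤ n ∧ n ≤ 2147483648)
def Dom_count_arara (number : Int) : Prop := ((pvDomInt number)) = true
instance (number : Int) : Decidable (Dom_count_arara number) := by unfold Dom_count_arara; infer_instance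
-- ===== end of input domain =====

-- B replaces A's lookup table + subtract-8 while loop by the closed form
-- 'adak' * (number // 2) (+ 'anane' if odd) joined with spaces: simpler, no loop.

-- ===== PORT A =====
-- the dict literal number_and_arara
def araraDict : PySem.Dict Int String :=
  PySem.Dict.ofList [(1, "anane"), (2, "adak"), (3, "adak anane"), (4, "adak adak"),
    (5, "adak adak anane"), (6, "adak adak adak"), (7, "adak adak adak anane"),
    (8, "adak adak adak adak")]

-- the while loop, step for step; fuel only makes it total (number.toNat steps suffice:
-- number shrinks by 8 each iteration). The dict lookup raises outside keys 1..8
-- (excluded by Pre_); getD "" there.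
def araraLoop (fuel : Nat) (number : Int) (result : List String) : List String :=
  match fuel with
  | 0 => result
  | Nat.succ f =>
    if number ≠ 0 then
      if number > 8 then araraLoop f (number - 8) (result ++ [araraDict.getD 8 ""])
      else result ++ [araraDict.getD number ""]
    else result

def count_arara (number : Int) : String :=
  if number ≤ 8 then araraDict.getD number ""
  else PySem.Str.join " " (araraLoop number.toNat number [])

-- ===== PORT B =====
def count_arara_alt (number : Int) : String :=
  PySem.Str.join " "
    (PySem.List.pyRepeat ["adak"] (PySem.Int.floordiv number 2) ++
      (if PySem.Int.mod number 2 ≠ 0 then ["anane"] else []))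

-- ===== PRECONDITION & SPEC =====
-- A's dict lookup raises KeyError for non-positive numbers; Pre_ excludes exactly those raising inputs.
def Pre_count_arara (number : Int) : Prop := 1 ≤ number
instance (number : Int) : Decidable (Pre_count_arara number) := by unfold Pre_count_arara; infer_instance
def pvWitness_count_arara : Int := (5)

def Spec_count_arara (number : Int) (out : String) : Prop := out = count_arara_alt number
instance (number : Int) (out : String) : Decidable (Spec_count_arara number out) := by unfold Spec_count_arara; infer_instance

-- ===== CLAIM (what is proved, stated in full; the proofs are below) =====
def Claim_equal_count_arara : Prop := ∀ (number : Int), Dom_count_arara number → Pre_count_arara number → Spec_count_arara number (count_arara number)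

-- ===== LEMMAS AND PROOFS =====

-- the loop only ever appends to result
lemma araraLoop_append (fuel : Nat) : ∀ (number : Int) (r : List String),
    araraLoop fuel number r = r ++ araraLoop fuel number [] := by
  induction fuel with
  | zero => intro n r; simp [araraLoop]
  | succ f ih =>
    intro n r
    simp only [araraLoop]
    split_ifs with h0 h8
    · rw [ih (n - 8) (r ++ [araraDict.getD 8 ""]), ih (n - 8) ([] ++ [araraDict.getD 8 ""])]
      simp
    · simp
    · simp

lemma araraLoop_ne_nil (fuel : Nat) (number : Int) (h : 1 ≤ number)
    (hf : 1 ≤ fuel) : araraLoop fuel number [] ≠ [] := by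
  cases fuel with
  | zero => omega
  | succ f =>
    simp only [araraLoop]
    split_ifs with h0 h8
    · rw [araraLoop_append]; simp
    · simp
    · omega

lemma join_cons_of_ne_nil (a : String) (l : List String) (h : l ≠ []) :
    PySem.Str.join " " (a :: l) = a ++ " " ++ PySem.Str.join " " l := by
  cases l with
  | nil => exact absurd rfl h
  | cons b t =>
    simp [PySem.Str.join, PySem.Chars.join_cons_cons]
    rw [String.append_assoc,
      show (' ' :: PySem.Chars.join [' '] (b.toList :: t.map String.toList))
        = [' '] ++ PySem.Chars.join [' '] (b.toList :: t.map String.toList) from rfl,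
      String.ofList_append]

-- the closed form written with Lean's Euclidean / and % (equal to Python's for divisor 2)
def altParts (m : Int) : List String :=
  List.replicate (m / 2).toNat "adak" ++ (if m % 2 ≠ 0 then ["anane"] else [])

lemma alt_eq (m : Int) : count_arara_alt m = PySem.Str.join " " (altParts m) := by
  unfold count_arara_alt altParts
  rw [PySem.List.pyRepeat_singleton, PySem.Int.floordiv_eq_ediv_of_pos (by omega),
    PySem.Int.mod_eq_emod_of_pos (by omega)]

lemma altParts_ne_nil (m : Int) (h : 1 ≤ m) : altParts m ≠ [] := by
  unfold altParts
  split_ifs with hodd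
  · simp
  · simp
    omega

lemma alt_add_eight (m : Int) (h : 1 ≤ m) :
    count_arara_alt (m + 8) = "adak adak adak adak" ++ " " ++ count_arara_alt m := by
  rw [alt_eq, alt_eq]
  have hparts : altParts (m + 8) = "adak" :: "adak" :: "adak" :: "adak" :: altParts m := by
    unfold altParts
    have h2 : ((m + 8) / 2).toNat = 4 + (m / 2).toNat := by omega
    have hm2 : (m + 8) % 2 = m % 2 := by omega
    rw [h2, hm2, List.replicate_add]
    simp [List.replicate_succ]
  rw [hparts]
  have t1 : altParts m ≠ [] := altParts_ne_nil m h
  have t2 : ("adak" :: altParts m) ≠ [] := by simp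
  have t3 : ("adak" :: "adak" :: altParts m) ≠ [] := by simp
  have t4 : ("adak" :: "adak" :: "adak" :: altParts m) ≠ [] := by simp
  rw [join_cons_of_ne_nil _ _ t4, join_cons_of_ne_nil _ _ t3,
    join_cons_of_ne_nil _ _ t2, join_cons_of_ne_nil _ _ t1]
  simp [← String.append_assoc]

-- the loop joined is the closed form, for any sufficient fuel
lemma loop_join (fuel : Nat) : ∀ (number : Int), 1 ≤ number → number.toNat ≤ fuel →
    PySem.Str.join " " (araraLoop fuel number []) = count_arara_alt number := by
  induction fuel with
  | zero => intro n h hf; omega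
  | succ f ih =>
    intro n h hf
    by_cases h8 : n ≤ 8
    · -- one iteration: appends the dict word for n and stops
      simp only [araraLoop]
      rw [if_pos (by omega), if_neg (by omega)]
      interval_cases n <;> decide
    · -- n > 8: append the word for 8 and continue with n - 8
      simp only [araraLoop]
      rw [if_pos (by omega), if_pos (by omega), araraLoop_append, List.nil_append,
        List.singleton_append,
        join_cons_of_ne_nil _ _ (araraLoop_ne_nil f (n - 8) (by omega) (by omega)),
        show araraDict.getD 8 "" = "adak adak adak adak" from by decide,
        ih (n - 8) (by omega) (by omega)]
      have := alt_add_eight (n - 8) (by omega)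
      rw [show n - 8 + 8 = n by ring] at this
      rw [← this]

lemma main_eq (number : Int) (h : 1 ≤ number) : count_arara number = count_arara_alt number := by
  unfold count_arara
  by_cases h8 : number ≤ 8
  · rw [if_pos h8]
    interval_cases number <;> decide
  · rw [if_neg h8]
    exact loop_join number.toNat number h le_rfl

-- ===== VERDICT (by name: the statement is the Claim_ definition above) =====
theorem count_arara_spec : Claim_equal_count_arara := by
  intro number _ hpre
  exact main_eq number hpre
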